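-- pv_equiv track=rewrite | github.com/melodist/CodingPractice | src/HackerRank/Cutting Boards.py | boardCutting
-- ===== SOURCE A (Python) =====
-- def boardCutting(cost_y, cost_x):
--     cost_x.sort(reverse=True)
--     cost_y.sort(reverse=True)
--
--     n, m = len(cost_x), len(cost_y)
--     i, j = 0, 0
--     ans = 0
--     MOD = 10**9 + 7
--     while i < n or j < m:
--         if j < m and i < n:
--             if cost_x[i] < cost_y[j]:
--                 ans += cost_y[j] * (i+1)
--                 j += 1
--             else:
--                 ans += cost_x[i] * (j+1)
--                 i += 1
--         elif i < n:
--             ans += cost_x[i] * (j+1)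
--             i += 1
--         else:
--             ans += cost_y[j] * (i+1)
--             j += 1
--
--     return ans % MOD
-- ===== SOURCE B (Python) =====
-- def boardCutting(cost_y, cost_x):
--     cost_x.sort(reverse=True)
--     cost_y.sort(reverse=True)
--     cuts = [(c, 0) for c in cost_x] + [(c, 1) for c in cost_y]
--     cuts.sort(key=lambda t: (-t[0], t[1]))
--     ans = 0
--     xc = 0
--     yc = 0
--     for c, axis in cuts:
--         if axis == 0:
--             ans += c * (yc + 1)
--             xc += 1
--         else:
--             ans += c * (xc + 1)
--             yc += 1
--     return ans % (10**9 + 7)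
-- ===== Notes on version B (the rewrite author's own statement) =====
-- stated objective: alternative
-- what changed: Replaces A's two-pointer merge walk over the two separately sorted lists (with index bookkeeping and three loop branches) by one combined descending sort of tagged cuts (cost, axis) and a single linear pass maintaining per-axis counters.
import Mathlib
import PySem

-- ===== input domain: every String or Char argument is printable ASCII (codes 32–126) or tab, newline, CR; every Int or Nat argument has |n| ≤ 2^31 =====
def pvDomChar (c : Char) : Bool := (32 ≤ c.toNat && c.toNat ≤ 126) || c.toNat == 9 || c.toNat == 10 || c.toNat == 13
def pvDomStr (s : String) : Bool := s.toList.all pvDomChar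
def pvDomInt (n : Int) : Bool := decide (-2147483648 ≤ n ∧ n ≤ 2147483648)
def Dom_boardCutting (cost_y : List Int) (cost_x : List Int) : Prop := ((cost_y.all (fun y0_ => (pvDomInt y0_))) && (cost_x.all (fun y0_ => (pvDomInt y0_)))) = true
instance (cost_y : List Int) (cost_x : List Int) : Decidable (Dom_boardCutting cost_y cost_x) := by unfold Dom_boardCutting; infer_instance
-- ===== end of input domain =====

-- B replaces A's two-pointer merge walk by one combined descending sort of tagged cuts and a
-- single counter-driven pass (objective: alternative decomposition, same cost). Both A and B
-- sort their list arguments in place in Python; the equivalence proved here is about the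
-- return value (the in-place sorts are identical in A and B).

-- ===== PORT A =====
-- A's while-loop over indices i, j into the two sorted lists, rendered as recursion over the
-- unprocessed suffixes, carrying the Python counters i, j and the accumulator ans.
def boardCuttingLoop (cx : List Int) (cy : List Int) (i j ans : Int) : Int :=
  match cx, cy with
  | x :: xs, y :: ys =>
      if x < y then boardCuttingLoop (x :: xs) ys i (j + 1) (ans + y * (i + 1))
      else boardCuttingLoop xs (y :: ys) (i + 1) j (ans + x * (j + 1))
  | x :: xs, [] => boardCuttingLoop xs [] (i + 1) j (ans + x * (j + 1))
  | [], y :: ys => boardCuttingLoop [] ys i (j + 1) (ans + y * (i + 1))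
  | [], [] => ans
termination_by cx.length + cy.length

def boardCutting (cost_y : List Int) (cost_x : List Int) : Int :=
  let X := PySem.List.sorted cost_x (fun v => v) true
  let Y := PySem.List.sorted cost_y (fun v => v) true
  PySem.Int.mod (boardCuttingLoop X Y 0 0 0) (10 ^ 9 + 7)

-- ===== PORT B =====
-- one step of B's single pass: state (ans, xc, yc), cut (cost, axis)
def bcStep (s : Int × Int × Int) (t : Int × Int) : Int × Int × Int :=
  if t.2 = 0 then (s.1 + t.1 * (s.2.2 + 1), s.2.1 + 1, s.2.2)
  else (s.1 + t.1 * (s.2.1 + 1), s.2.1, s.2.2 + 1)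

def boardCutting_alt (cost_y : List Int) (cost_x : List Int) : Int :=
  let X := PySem.List.sorted cost_x (fun v => v) true
  let Y := PySem.List.sorted cost_y (fun v => v) true
  let cuts0 := X.map (fun c => (c, (0 : Int))) ++ Y.map (fun c => (c, (1 : Int)))
  let cuts := PySem.List.sorted2 cuts0 (fun t => -t.1) (fun t => t.2)
  PySem.Int.mod (cuts.foldl bcStep (0, 0, 0)).1 (10 ^ 9 + 7)

-- ===== PRECONDITION & SPEC =====
def Spec_boardCutting (cost_y : List Int) (cost_x : List Int) (out : Int) : Prop := out = boardCutting_alt cost_y cost_x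
instance (cost_y : List Int) (cost_x : List Int) (out : Int) : Decidable (Spec_boardCutting cost_y cost_x out) := by unfold Spec_boardCutting; infer_instance

-- ===== CLAIM (what is proved, stated in full; the proofs are below) =====
def Claim_equal_boardCutting : Prop := ∀ (cost_y : List Int) (cost_x : List Int), Dom_boardCutting cost_y cost_x → Spec_boardCutting cost_y cost_x (boardCutting cost_y cost_x)

-- ===== LEMMAS AND PROOFS =====

-- the sequence of tagged cuts in the order A's merge walk processes them
def mergeTag : List Int → List Int → List (Int × Int)
  | x :: xs, y :: ys =>
      if x < y then (y, 1) :: mergeTag (x :: xs) ys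
      else (x, 0) :: mergeTag xs (y :: ys)
  | xs, [] => xs.map (fun c => (c, 0))
  | [], ys => ys.map (fun c => (c, 1))
termination_by xs ys => xs.length + ys.length

-- B's sort key, as a single key into the lexicographic order
def bcKey (t : Int × Int) : Lex (Int × Int) := toLex (-t.1, t.2)

theorem bcKey_inj : Function.Injective bcKey := by
  intro a b h
  have h' : ((-a.1, a.2) : Int × Int) = (-b.1, b.2) := congrArg ofLex h
  rcases a with ⟨a1, a2⟩; rcases b with ⟨b1, b2⟩
  simp only [Prod.mk.injEq] at h' ⊢
  omega

theorem loopX_eq_fold (xs : List Int) (i j ans : Int) :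
    boardCuttingLoop xs [] i j ans = ((xs.map (fun c => (c, (0 : Int)))).foldl bcStep (ans, i, j)).1 := by
  induction xs generalizing i j ans with
  | nil => simp [boardCuttingLoop]
  | cons x xs ih => simp [boardCuttingLoop, ih, bcStep]

theorem loopY_eq_fold (ys : List Int) (i j ans : Int) :
    boardCuttingLoop [] ys i j ans = ((ys.map (fun c => (c, (1 : Int)))).foldl bcStep (ans, i, j)).1 := by
  induction ys generalizing i j ans with
  | nil => simp [boardCuttingLoop]
  | cons y ys ih => simp [boardCuttingLoop, ih, bcStep]

theorem loop_eq_fold (xs ys : List Int) (i j ans : Int) :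
    boardCuttingLoop xs ys i j ans = ((mergeTag xs ys).foldl bcStep (ans, i, j)).1 := by
  induction xs, ys using mergeTag.induct generalizing i j ans with
  | case1 x xs y ys h ih =>
      simp only [boardCuttingLoop, mergeTag, if_pos h, List.foldl_cons]
      rw [ih]; rfl
  | case2 x xs y ys h ih =>
      simp only [boardCuttingLoop, mergeTag, if_neg h, List.foldl_cons]
      rw [ih]; rfl
  | case3 xs =>
      cases xs with
      | nil => simp [boardCuttingLoop, mergeTag]
      | cons x xs => simpa [mergeTag] using loopX_eq_fold (x :: xs) i j ans
  | case4 ys hne =>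
      cases ys with
      | nil => exact absurd rfl hne
      | cons y ys => simpa [mergeTag] using loopY_eq_fold (y :: ys) i j ans

theorem mergeTag_perm (xs ys : List Int) :
    (mergeTag xs ys).Perm (xs.map (fun c => (c, (0 : Int))) ++ ys.map (fun c => (c, (1 : Int)))) := by
  induction xs, ys using mergeTag.induct with
  | case1 x xs y ys h ih =>
      simp only [mergeTag, if_pos h, List.map_cons]
      exact (ih.cons _).trans List.perm_middle.symm
  | case2 x xs y ys h ih =>
      simp only [mergeTag, if_neg h, List.map_cons, List.cons_append]
      exact ih.cons _
  | case3 xs => simp [mergeTag]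
  | case4 ys hne =>
      cases ys with
      | nil => exact absurd rfl hne
      | cons y ys => simp [mergeTag]

theorem mem_mergeTag {xs ys : List Int} {e : Int × Int} (he : e ∈ mergeTag xs ys) :
    (e.2 = 0 ∧ e.1 ∈ xs) ∨ (e.2 = 1 ∧ e.1 ∈ ys) := by
  have := (mergeTag_perm xs ys).mem_iff.mp he
  rcases List.mem_append.mp this with h | h
  · rcases List.mem_map.mp h with ⟨c, hc, rfl⟩; exact Or.inl ⟨rfl, hc⟩
  · rcases List.mem_map.mp h with ⟨c, hc, rfl⟩; exact Or.inr ⟨rfl, hc⟩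

theorem mergeTag_pairwise {xs ys : List Int}
    (hx : xs.Pairwise (fun a b => b ≤ a)) (hy : ys.Pairwise (fun a b => b ≤ a)) :
    (mergeTag xs ys).Pairwise (fun a b => bcKey a ≤ bcKey b) := by
  induction xs, ys using mergeTag.induct with
  | case1 x xs y ys h ih =>
      rw [List.pairwise_cons] at hy
      simp only [mergeTag, if_pos h, List.pairwise_cons]
      refine ⟨?_, ih hx hy.2⟩
      intro e he
      rcases mem_mergeTag he with ⟨h2, h1⟩ | ⟨h2, h1⟩
      · have hle : e.1 ≤ x := by
          rw [List.pairwise_cons] at hx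
          rcases List.mem_cons.mp h1 with rfl | hm
          · exact le_refl _
          · exact hx.1 _ hm
        show toLex (-y, (1:Int)) ≤ toLex (-e.1, e.2)
        rw [Prod.Lex.toLex_le_toLex]; left; omega
      · have hle : e.1 ≤ y := hy.1 _ h1
        show toLex (-y, (1:Int)) ≤ toLex (-e.1, e.2)
        rw [Prod.Lex.toLex_le_toLex]; omega
  | case2 x xs y ys h ih =>
      rw [List.pairwise_cons] at hx
      simp only [mergeTag, if_neg h, List.pairwise_cons]
      refine ⟨?_, ih hx.2 hy⟩
      intro e he
      rcases mem_mergeTag he with ⟨h2, h1⟩ | ⟨h2, h1⟩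
      · have hle : e.1 ≤ x := hx.1 _ h1
        show toLex (-x, (0:Int)) ≤ toLex (-e.1, e.2)
        rw [Prod.Lex.toLex_le_toLex]; omega
      · have hle : e.1 ≤ x := by
          rw [List.pairwise_cons] at hy
          rcases List.mem_cons.mp h1 with rfl | hm
          · omega
          · have := hy.1 _ hm; omega
        show toLex (-x, (0:Int)) ≤ toLex (-e.1, e.2)
        rw [Prod.Lex.toLex_le_toLex]; omega
  | case3 xs =>
      simp only [mergeTag, List.pairwise_map]
      refine hx.imp ?_
      intro a b hab
      show toLex (-a, (0:Int)) ≤ toLex (-b, (0:Int))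
      rw [Prod.Lex.toLex_le_toLex]; omega
  | case4 ys hne =>
      cases ys with
      | nil => exact absurd rfl hne
      | cons y ys =>
          simp only [mergeTag, List.pairwise_map]
          refine hy.imp ?_
          intro a b hab
          show toLex (-a, (1:Int)) ≤ toLex (-b, (1:Int))
          rw [Prod.Lex.toLex_le_toLex]; omega

-- sorted2 with keys (-c, axis) is sorted with the single lexicographic key bcKey
theorem sorted2_eq_sorted_bcKey (xs : List (Int × Int)) :
    PySem.List.sorted2 xs (fun t => -t.1) (fun t => t.2) = PySem.List.sorted xs bcKey := by
  unfold PySem.List.sorted2 PySem.List.sorted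
  have hb : (fun (a b : Int × Int) => (decide (-a.1 < -b.1) || (!decide (-b.1 < -a.1) && decide (a.2 < b.2))))
      = fun a b => decide (bcKey a < bcKey b) := by
    funext a b
    have : (bcKey a < bcKey b) ↔ (-a.1 < -b.1 ∨ (-a.1 = -b.1 ∧ a.2 < b.2)) := Prod.Lex.toLex_lt_toLex
    rw [Bool.eq_iff_iff]
    simp only [Bool.or_eq_true, Bool.and_eq_true, Bool.not_eq_true', decide_eq_true_eq,
      decide_eq_false_iff_not, this]
    omega
  simp only [Bool.false_eq_true, if_false]
  rw [hb]

theorem cuts_eq_mergeTag {xs ys : List Int}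
    (hx : xs.Pairwise (fun a b => b ≤ a)) (hy : ys.Pairwise (fun a b => b ≤ a)) :
    PySem.List.sorted2 (xs.map (fun c => (c, (0 : Int))) ++ ys.map (fun c => (c, (1 : Int))))
      (fun t => -t.1) (fun t => t.2) = mergeTag xs ys := by
  set cuts0 := xs.map (fun c => (c, (0 : Int))) ++ ys.map (fun c => (c, (1 : Int))) with hc0
  rw [sorted2_eq_sorted_bcKey]
  refine PySem.List.eq_of_perm_of_pairwise_le_of_injective bcKey bcKey_inj ?_ ?_ ?_
  · exact (PySem.List.sorted_perm cuts0 bcKey false).trans (mergeTag_perm xs ys).symm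
  · exact PySem.List.sorted_pairwise cuts0 bcKey
  · exact mergeTag_pairwise hx hy

theorem boardCutting_eq (cost_y cost_x : List Int) :
    boardCutting cost_y cost_x = boardCutting_alt cost_y cost_x := by
  unfold boardCutting boardCutting_alt
  dsimp only
  rw [cuts_eq_mergeTag (PySem.List.sorted_pairwise_rev cost_x (fun v => v))
      (PySem.List.sorted_pairwise_rev cost_y (fun v => v)),
    loop_eq_fold]

-- ===== VERDICT (by name: the statement is the Claim_ definition above) =====
theorem boardCutting_spec : Claim_equal_boardCutting := by
  intro cost_y cost_x _
  unfold Spec_boardCutting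
  exact boardCutting_eq cost_y cost_x
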